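-- pv_equiv track=rewrite | github.com/chyyuu/cargotree2mermaid | nodedeps.py | collect_downstream_deps
-- ===== SOURCE A (Python) =====
-- def collect_downstream_deps(node_id, edges, nodes, max_level=None):
--     """Collect downstream dependencies (nodes that this node depends on)
--
--     Args:
--         node_id: Starting node ID
--         edges: List of (parent, child) edges
--         nodes: Dict of node_id -> label
--         max_level: Maximum depth level (None for unlimited)
--     """
--     downstream = set()
--     visited = set()
--     queue = [(node_id, 0)]  # (node_id, level)
--
--     while queue:
--         current, level = queue.pop(0)
--         if current in visited:
--             continue
--         visited.add(current)
--
--         # Find children of current node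
--         for parent, child in edges:
--             if parent == current and child not in visited:
--                 # Check if we've exceeded max level
--                 if max_level is None or level + 1 <= max_level:
--                     downstream.add(child)
--                     queue.append((child, level + 1))
--
--     return downstream
-- ===== SOURCE B (Python) =====
-- def collect_downstream_deps(node_id, edges, nodes, max_level=None):
--     """Collect downstream dependencies via a parent->children adjacency index
--     and a level-synchronized frontier BFS."""
--     children = {}
--     for parent, child in edges:
--         children.setdefault(parent, []).append(child)
--     seen = {node_id}
--     result = set()
--     frontier = [node_id]
--     level = 0
--     while frontier and (max_level is None or level < max_level):
--         nxt = []
--         for u in frontier: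
--             for c in children.get(u, ()):
--                 if c not in seen:
--                     seen.add(c)
--                     result.add(c)
--                     nxt.append(c)
--         frontier = nxt
--         level += 1
--     return result
-- ===== Notes on version B (the rewrite author's own statement) =====
-- stated objective: alternative
-- what changed: B precomputes a parent->children adjacency dict once and runs a level-synchronized frontier BFS, instead of A's FIFO queue of (node, level) pairs that rescans the whole edge list for every dequeued node.
import Mathlib
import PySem

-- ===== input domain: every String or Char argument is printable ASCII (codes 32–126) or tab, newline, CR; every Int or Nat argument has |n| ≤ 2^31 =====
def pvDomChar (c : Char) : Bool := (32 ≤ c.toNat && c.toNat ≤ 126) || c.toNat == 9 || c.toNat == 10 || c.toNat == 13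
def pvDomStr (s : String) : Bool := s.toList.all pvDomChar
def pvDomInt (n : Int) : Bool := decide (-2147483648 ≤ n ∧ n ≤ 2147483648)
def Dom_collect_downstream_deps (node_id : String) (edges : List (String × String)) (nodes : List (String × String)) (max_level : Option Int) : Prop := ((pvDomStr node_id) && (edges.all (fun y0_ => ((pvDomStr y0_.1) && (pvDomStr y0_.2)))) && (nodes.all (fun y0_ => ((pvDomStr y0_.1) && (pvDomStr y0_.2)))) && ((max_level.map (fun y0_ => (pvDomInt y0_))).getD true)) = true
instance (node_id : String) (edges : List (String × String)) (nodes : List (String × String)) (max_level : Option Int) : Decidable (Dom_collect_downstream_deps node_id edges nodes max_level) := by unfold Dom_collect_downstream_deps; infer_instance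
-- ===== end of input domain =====

-- B replaces A's per-visit scan of the whole edge list by a parent→children index and a
-- level-synchronized BFS; same return value (proved equal as the same insertion-ordered set list).


-- ===== PORT A =====
-- 'max_level is None or level + 1 <= max_level'
def pvLevelOk (max_level : Option Int) (level : Int) : Bool :=
  match max_level with
  | none => true
  | some m => decide (level + 1 ≤ m)

-- the 'for parent, child in edges' loop of A's while-body, carrying (downstream, queue)
def pvInnerA (current : String) (level : Int) (max_level : Option Int) (visited : List String) :
    List (String × String) → List String → List (String × Int) → List String × List (String × Int)
  | [], dn, q => (dn, q)
  | (p, c) :: es, dn, q =>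
    if p = current ∧ c ∉ visited then
      if pvLevelOk max_level level then
        pvInnerA current level max_level visited es (PySem.Set.add dn c) (q ++ [(c, level + 1)])
      else
        pvInnerA current level max_level visited es dn q
    else
      pvInnerA current level max_level visited es dn q

-- (needed by pvLoopA's termination proof) the queue accumulator only appends
lemma pvInnerA_q (current : String) (level : Int) (max_level : Option Int) (visited : List String)
    (es : List (String × String)) :
    ∀ (dn : List String) (q : List (String × Int)),
      pvInnerA current level max_level visited es dn q =
        ((pvInnerA current level max_level visited es dn []).1,
          q ++ (pvInnerA current level max_level visited es dn []).2) := by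
  induction es with
  | nil => intro dn q; simp [pvInnerA]
  | cons e es ih =>
    intro dn q
    obtain ⟨p, c⟩ := e
    by_cases h : p = current ∧ c ∉ visited
    · by_cases hl : pvLevelOk max_level level
      · simp only [pvInnerA, if_pos h, if_pos hl]
        rw [ih (PySem.Set.add dn c) (q ++ [(c, level + 1)]),
            ih (PySem.Set.add dn c) ([] ++ [(c, level + 1)])]
        simp
      · simp only [pvInnerA, if_pos h, if_neg hl]
        exact ih dn q
    · simp only [pvInnerA, if_neg h]
      exact ih dn q

-- (needed by pvLoopA's termination proof) shape of the appended queue entries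
lemma pvInnerA_props (current : String) (level : Int) (max_level : Option Int)
    (visited : List String) (es : List (String × String)) :
    ∀ (dn : List String),
      (∀ x ∈ (pvInnerA current level max_level visited es dn []).2,
          x.2 = level + 1 ∧ x.1 ∈ es.map Prod.snd ∧ x.1 ∉ visited) ∧
      (pvInnerA current level max_level visited es dn []).2.length ≤ es.length := by
  induction es with
  | nil => intro dn; simp [pvInnerA]
  | cons e es ih =>
    intro dn
    obtain ⟨p, c⟩ := e
    by_cases h : p = current ∧ c ∉ visited
    · by_cases hl : pvLevelOk max_level level
      · simp only [pvInnerA, if_pos h, if_pos hl]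
        rw [pvInnerA_q current level max_level visited es (PySem.Set.add dn c) ([] ++ [(c, level + 1)])]
        constructor
        · intro x hx
          simp only [List.nil_append, List.cons_append, List.mem_cons] at hx
          rcases hx with rfl | hx
          · exact ⟨rfl, by simp, h.2⟩
          · obtain ⟨h1, h2, h3⟩ := (ih (PySem.Set.add dn c)).1 x hx
            exact ⟨h1, by simp [h2], h3⟩
        · simpa using Nat.succ_le_succ (ih (PySem.Set.add dn c)).2
      · simp only [pvInnerA, if_pos h, if_neg hl]
        constructor
        · intro x hx
          obtain ⟨h1, h2, h3⟩ := (ih dn).1 x hx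
          exact ⟨h1, by simp [h2], h3⟩
        · exact Nat.le_succ_of_le (ih dn).2
    · simp only [pvInnerA, if_neg h]
      constructor
      · intro x hx
        obtain ⟨h1, h2, h3⟩ := (ih dn).1 x hx
        exact ⟨h1, by simp [h2], h3⟩
      · exact Nat.le_succ_of_le (ih dn).2

-- A's 'while queue:' loop
def pvLoopA (edges : List (String × String)) (max_level : Option Int) :
    List (String × Int) → List String → List String → List String
  | [], _, down => down
  | (current, level) :: rest, visited, down =>
    if current ∈ visited then
      pvLoopA edges max_level rest visited down
    else
      let visited' := PySem.Set.add visited current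
      let r := pvInnerA current level max_level visited' edges down rest
      pvLoopA edges max_level r.2 visited' r.1
termination_by q visited _ =>
  ((edges.map Prod.snd ++ q.map Prod.fst).toFinset \ visited.toFinset).card * (edges.length + 1)
    + q.length
decreasing_by
  · -- skip a visited head: queue shrinks, the card does not grow
    have hsub : ((edges.map Prod.snd ++ rest.map Prod.fst).toFinset \ visited.toFinset) ⊆
        ((edges.map Prod.snd ++ ((current, level) :: rest).map Prod.fst).toFinset \ visited.toFinset) := by
      intro x hx
      simp only [Finset.mem_sdiff, List.mem_toFinset, List.mem_append, List.map_cons,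
        List.mem_cons] at hx ⊢
      tauto
    have h1 := Nat.mul_le_mul_right (edges.length + 1) (Finset.card_le_card hsub)
    simp only [List.length_cons]
    omega
  · -- process an unvisited head: the unvisited-candidate card strictly drops
    rename_i hcv
    rw [pvInnerA_q] at *
    have hprops := pvInnerA_props current level max_level (PySem.Set.add visited current) edges down
    have hlen : (pvInnerA current level max_level (PySem.Set.add visited current) edges down []).2.length ≤ edges.length := hprops.2
    have hcard : (((edges.map Prod.snd ++ (rest ++ (pvInnerA current level max_level (PySem.Set.add visited current) edges down []).2).map Prod.fst).toFinset \ (PySem.Set.add visited current).toFinset).card) + 1 ≤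
        ((edges.map Prod.snd ++ ((current, level) :: rest).map Prod.fst).toFinset \ visited.toFinset).card := by
      have hss : ((edges.map Prod.snd ++ (rest ++ (pvInnerA current level max_level (PySem.Set.add visited current) edges down []).2).map Prod.fst).toFinset \ (PySem.Set.add visited current).toFinset) ⊂
          ((edges.map Prod.snd ++ ((current, level) :: rest).map Prod.fst).toFinset \ visited.toFinset) := by
        constructor
        · intro x hx
          simp only [Finset.mem_sdiff, List.mem_toFinset, List.mem_append, List.map_append,
            List.map_cons, List.mem_cons, PySem.Set.mem_add] at hx ⊢
          obtain ⟨hx1, hx2⟩ := hx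
          refine ⟨?_, fun hv => hx2 (Or.inl hv)⟩
          rcases hx1 with h | h | h
          · exact Or.inl h
          · exact Or.inr (Or.inr h)
          · exact Or.inl ((hprops.1 ⟨x, level + 1⟩ (by
              -- x is a first component of an appended pair
              obtain ⟨y, hy, hyx⟩ := List.mem_map.mp h
              have := (hprops.1 y hy).1
              cases y with
              | mk y1 y2 => simp at hyx this; rw [← hyx]; simpa [this] using hy)).2.1)
        · intro hsub
          have hc : current ∈ ((edges.map Prod.snd ++ ((current, level) :: rest).map Prod.fst).toFinset \ visited.toFinset) := by
            simp [List.mem_toFinset, hcv]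
          have := hsub hc
          simp [PySem.Set.mem_add] at this
      exact Finset.card_lt_card hss
    have h1 := Nat.mul_le_mul_right (edges.length + 1) hcard
    rw [Nat.succ_mul] at h1
    simp only [List.length_append, List.length_cons]
    omega

def collect_downstream_deps (node_id : String) (edges : List (String × String))
    (nodes : List (String × String)) (max_level : Option Int) : List String :=
  pvLoopA edges max_level [(node_id, 0)] [] []

-- ===== PORT B =====
-- children.setdefault(parent, []).append(child) over all edges (dict insert keeps position)
def pvBuildChildren (edges : List (String × String)) : PySem.Dict String (List String) :=
  edges.foldl (fun d p => d.modify p.1 [] (· ++ [p.2])) PySem.Dict.empty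

-- 'for c in children.get(u, ()):' body of B
def pvProcChildren : List String → List String → List String → List String →
    List String × List String × List String
  | [], seen, result, nxt => (seen, result, nxt)
  | c :: cs, seen, result, nxt =>
    if c ∈ seen then
      pvProcChildren cs seen result nxt
    else
      pvProcChildren cs (PySem.Set.add seen c) (PySem.Set.add result c) (nxt ++ [c])

-- 'for u in frontier:' loop of B
def pvProcFrontier (childD : PySem.Dict String (List String)) :
    List String → List String → List String → List String →
    List String × List String × List String
  | [], seen, result, nxt => (seen, result, nxt)
  | u :: fs, seen, result, nxt =>
    let t := pvProcChildren (childD.getD u []) seen result nxt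
    pvProcFrontier childD fs t.1 t.2.1 t.2.2

-- negation of 'max_level is None or level < max_level'
def pvStopB (max_level : Option Int) (level : Int) : Bool :=
  match max_level with
  | none => false
  | some m => decide (m ≤ level)

-- (needed by pvLoopB's termination proof) a child looked up in the dict is among its values
lemma pvMem_getD_vals {d : PySem.Dict String (List String)} {u x : String}
    (h : x ∈ d.getD u []) : x ∈ d.values.flatten := by
  rw [PySem.Dict.getD_eq_get?_getD] at h
  cases hg : d.get? u with
  | none => rw [hg] at h; simp at h
  | some v =>
    rw [hg] at h
    simp only [Option.getD_some] at h
    have hv : (u, v) ∈ d.items := PySem.Dict.mem_items_of_get?_eq_some _ hg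
    have hvv : v ∈ d.values := by
      simp only [PySem.Dict.values, List.mem_map]
      exact ⟨(u, v), hv, rfl⟩
    exact List.mem_flatten.mpr ⟨v, hvv, h⟩

-- (needed by pvLoopB's termination proof) one inner loop appends the same fresh block to seen and nxt
lemma pvProcChildren_delta (cs : List String) :
    ∀ (seen result nxt : List String),
      ∃ δ t2, pvProcChildren cs seen result nxt = (seen ++ δ, t2, nxt ++ δ) ∧ δ.Nodup ∧
        ∀ x ∈ δ, x ∈ cs ∧ x ∉ seen := by
  induction cs with
  | nil => intro seen result nxt; exact ⟨[], result, by simp [pvProcChildren]⟩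
  | cons c cs ih =>
    intro seen result nxt
    by_cases hc : c ∈ seen
    · obtain ⟨δ, t2, h1, h2, h3⟩ := ih seen result nxt
      exact ⟨δ, t2, by simpa [pvProcChildren, if_pos hc] using h1, h2,
        fun x hx => ⟨by simp [(h3 x hx).1], (h3 x hx).2⟩⟩
    · obtain ⟨δ, t2, h1, h2, h3⟩ := ih (PySem.Set.add seen c) (PySem.Set.add result c) (nxt ++ [c])
      rw [PySem.Set.add_of_not_mem hc] at h1 h3
      refine ⟨c :: δ, t2, ?_, ?_, ?_⟩
      · simp only [pvProcChildren, if_neg hc]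
        rw [PySem.Set.add_of_not_mem hc, h1]
        simp
      · exact List.nodup_cons.mpr ⟨fun hcδ => by have := (h3 c hcδ).2; simp at this, h2⟩
      · intro x hx
        rcases List.mem_cons.mp hx with rfl | hx
        · exact ⟨by simp, hc⟩
        · have := h3 x hx
          exact ⟨by simp [this.1], fun hxs => this.2 (by simp [hxs])⟩

-- (needed by pvLoopB's termination proof) same for a whole frontier
lemma pvProcFrontier_delta (childD : PySem.Dict String (List String)) (fs : List String) :
    ∀ (seen result nxt : List String),
      ∃ δ t2, pvProcFrontier childD fs seen result nxt = (seen ++ δ, t2, nxt ++ δ) ∧ δ.Nodup ∧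
        ∀ x ∈ δ, x ∈ childD.values.flatten ∧ x ∉ seen := by
  induction fs with
  | nil => intro seen result nxt; exact ⟨[], result, by simp [pvProcFrontier]⟩
  | cons u fs ih =>
    intro seen result nxt
    obtain ⟨δ₁, s2, h1, h2, h3⟩ := pvProcChildren_delta (childD.getD u []) seen result nxt
    obtain ⟨δ₂, t2, g1, g2, g3⟩ := ih (seen ++ δ₁) s2 (nxt ++ δ₁)
    refine ⟨δ₁ ++ δ₂, t2, ?_, ?_, ?_⟩
    · simp only [pvProcFrontier, h1]
      rw [g1]; simp
    · refine List.Nodup.append h2 g2 (fun x hx1 hx2 => ?_)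
      have := (g3 x hx2).2
      simp [hx1] at this
    · intro x hx
      rcases List.mem_append.mp hx with hx | hx
      · exact ⟨pvMem_getD_vals (h3 x hx).1, (h3 x hx).2⟩
      · exact ⟨(g3 x hx).1, fun hs => (g3 x hx).2 (by simp [hs])⟩

-- B's 'while frontier and (max_level is None or level < max_level):' loop
def pvLoopB (childD : PySem.Dict String (List String)) (max_level : Option Int) :
    List String → List String → List String → Int → List String
  | frontier, seen, result, level =>
    if frontier.isEmpty || pvStopB max_level level then result
    else
      let t := pvProcFrontier childD frontier seen result []
      pvLoopB childD max_level t.2.2 t.1 t.2.1 (level + 1)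
termination_by frontier seen _ _ =>
  ((childD.values.flatten).toFinset \ seen.toFinset).card + frontier.length
decreasing_by
  rename_i hcond
  have hfront : frontier ≠ [] := by
    intro h; subst h; simp at hcond
  obtain ⟨δ, t2, h1, h2, h3⟩ := pvProcFrontier_delta childD frontier seen result []
  rw [h1]
  simp only [List.nil_append]
  have hδsub : δ.toFinset ⊆ (childD.values.flatten.toFinset \ seen.toFinset) := by
    intro x hx
    simp only [List.mem_toFinset, Finset.mem_sdiff] at hx ⊢
    exact (h3 x hx)
  have hset : ((childD.values.flatten).toFinset \ (seen ++ δ).toFinset) =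
      ((childD.values.flatten).toFinset \ seen.toFinset) \ δ.toFinset := by
    ext x
    simp only [Finset.mem_sdiff, List.mem_toFinset, List.mem_append]
    tauto
  rw [hset]
  have hinter : δ.toFinset ∩ (childD.values.flatten.toFinset \ seen.toFinset) = δ.toFinset :=
    Finset.inter_eq_left.mpr hδsub
  have hc2 : ((childD.values.flatten.toFinset \ seen.toFinset) \ δ.toFinset).card =
      (childD.values.flatten.toFinset \ seen.toFinset).card - (δ.toFinset ∩ (childD.values.flatten.toFinset \ seen.toFinset)).card :=
    Finset.card_sdiff
  rw [hinter] at hc2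
  have hδcard : δ.toFinset.card = δ.length := List.toFinset_card_of_nodup h2
  have hle := Finset.card_le_card hδsub
  have hfl : 0 < frontier.length := List.length_pos_iff.mpr hfront
  omega

def collect_downstream_deps_alt (node_id : String) (edges : List (String × String))
    (nodes : List (String × String)) (max_level : Option Int) : List String :=
  let childD := pvBuildChildren edges
  pvLoopB childD max_level [node_id] [node_id] [] 0

-- ===== PRECONDITION & SPEC =====
def Spec_collect_downstream_deps (node_id : String) (edges : List (String × String)) (nodes : List (String × String)) (max_level : Option Int) (out : List String) : Prop := out = collect_downstream_deps_alt node_id edges nodes max_level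
instance (node_id : String) (edges : List (String × String)) (nodes : List (String × String)) (max_level : Option Int) (out : List String) : Decidable (Spec_collect_downstream_deps node_id edges nodes max_level out) := by unfold Spec_collect_downstream_deps; infer_instance

-- ===== CLAIM (what is proved, stated in full; the proofs are below) =====
def Claim_equal_collect_downstream_deps : Prop := ∀ (node_id : String) (edges : List (String × String)) (nodes : List (String × String)) (max_level : Option Int), Dom_collect_downstream_deps node_id edges nodes max_level → Spec_collect_downstream_deps node_id edges nodes max_level (collect_downstream_deps node_id edges nodes max_level)

-- ===== LEMMAS AND PROOFS =====

-- B's loop state, entered mid-level: process the remaining frontier F into (seen, result, nxt),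
-- then continue with B's while-loop at the next level
def pvLoopBMid (childD : PySem.Dict String (List String)) (max_level : Option Int)
    (F seen result nxt : List String) (level : Int) : List String :=
  let t := pvProcFrontier childD F seen result nxt
  pvLoopB childD max_level t.2.2 t.1 t.2.1 (level + 1)

-- the sequence of first occurrences of not-yet-visited nodes (simulates A's pop-and-skip)
def pvReduceQ : List String → List String → List String
  | _, [] => []
  | vis, c :: q => if c ∈ vis then pvReduceQ vis q else c :: pvReduceQ (c :: vis) q

lemma pvReduceQ_congr {v w : List String} (l : List String) (h : ∀ x, x ∈ v ↔ x ∈ w) :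
    pvReduceQ v l = pvReduceQ w l := by
  induction l generalizing v w with
  | nil => rfl
  | cons c q ih =>
    simp only [pvReduceQ]
    by_cases hc : c ∈ v
    · rw [if_pos hc, if_pos ((h c).1 hc)]
      exact ih h
    · rw [if_neg hc, if_neg (fun hw => hc ((h c).2 hw))]
      exact congrArg (c :: ·) (ih (fun x => by simp [h x]))

lemma pvReduceQ_append (l₁ l₂ v : List String) :
    pvReduceQ v (l₁ ++ l₂) = pvReduceQ v l₁ ++ pvReduceQ (v ++ pvReduceQ v l₁) l₂ := by
  induction l₁ generalizing v with
  | nil => simpa [pvReduceQ] using pvReduceQ_congr l₂ (by simp)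
  | cons c q ih =>
    simp only [List.cons_append, pvReduceQ]
    by_cases hc : c ∈ v
    · rw [if_pos hc, if_pos hc, ih]
    · rw [if_neg hc, if_neg hc]
      rw [ih]
      simp only [List.cons_append]
      refine congrArg (c :: ·) (congrArg _ ?_)
      exact pvReduceQ_congr l₂ (fun x => by simp; tauto)

lemma pvMem_reduceQ {x : String} {l : List String} (hx : x ∈ l) :
    ∀ {v : List String}, x ∉ v → x ∈ pvReduceQ v l := by
  induction l with
  | nil => simp at hx
  | cons c q ih =>
    intro v hv
    simp only [pvReduceQ]
    by_cases hc : c ∈ v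
    · rw [if_pos hc]
      rcases List.mem_cons.mp hx with rfl | hx'
      · exact absurd hc hv
      · exact ih hx' hv
    · rw [if_neg hc]
      rcases List.mem_cons.mp hx with rfl | hx'
      · exact List.mem_cons_self
      · by_cases hxc : x = c
        · subst hxc; exact List.mem_cons_self
        · exact List.mem_cons_of_mem _ (ih hx' (by simp [hxc, hv]))

lemma pvReduceQ_subset {x : String} {l : List String} :
    ∀ {v : List String}, x ∈ pvReduceQ v l → x ∈ l ∧ x ∉ v := by
  induction l with
  | nil => intro v h; simp [pvReduceQ] at h
  | cons c q ih =>
    intro v h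
    simp only [pvReduceQ] at h
    by_cases hc : c ∈ v
    · rw [if_pos hc] at h
      have := ih h
      exact ⟨List.mem_cons_of_mem _ this.1, this.2⟩
    · rw [if_neg hc] at h
      rcases List.mem_cons.mp h with rfl | h'
      · exact ⟨List.mem_cons_self, hc⟩
      · have := ih h'
        exact ⟨List.mem_cons_of_mem _ this.1, fun hv => this.2 (by simp [hv])⟩

lemma pvReduceQ_nil_forall {v l : List String} (h : pvReduceQ v l = []) : ∀ x ∈ l, x ∈ v := by
  intro x hx
  by_contra hv
  have := pvMem_reduceQ hx hv
  simp [h] at this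

-- unfolding equations for the two while-loops
lemma pvLoopA_nil (edges : List (String × String)) (maxl : Option Int)
    (visited down : List String) : pvLoopA edges maxl [] visited down = down := by
  rw [pvLoopA]

lemma pvLoopA_cons (edges : List (String × String)) (maxl : Option Int) (c : String) (l : Int)
    (q : List (String × Int)) (visited down : List String) :
    pvLoopA edges maxl ((c, l) :: q) visited down =
      if c ∈ visited then pvLoopA edges maxl q visited down
      else
        pvLoopA edges maxl
          (pvInnerA c l maxl (PySem.Set.add visited c) edges down q).2
          (PySem.Set.add visited c)
          (pvInnerA c l maxl (PySem.Set.add visited c) edges down q).1 := by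
  rw [pvLoopA]

lemma pvLoopB_eq (childD : PySem.Dict String (List String)) (maxl : Option Int)
    (f s r : List String) (l : Int) :
    pvLoopB childD maxl f s r l =
      if f.isEmpty || pvStopB maxl l then r else pvLoopBMid childD maxl f s r [] l := by
  rw [pvLoopB]; rfl

lemma pvLoopBMid_cons (childD : PySem.Dict String (List String)) (maxl : Option Int)
    (u : String) (F s r n : List String) (l : Int) :
    pvLoopBMid childD maxl (u :: F) s r n l =
      pvLoopBMid childD maxl F
        (pvProcChildren (childD.getD u []) s r n).1
        (pvProcChildren (childD.getD u []) s r n).2.1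
        (pvProcChildren (childD.getD u []) s r n).2.2 l := by
  simp [pvLoopBMid, pvProcFrontier]

-- the built dict looks up exactly the children of u, in edge order
lemma pvBuildChildren_getD (edges : List (String × String)) (u : String) :
    (pvBuildChildren edges).getD u [] = (edges.filter (fun p => p.1 == u)).map Prod.snd := by
  unfold pvBuildChildren
  rw [PySem.Dict.getD_foldl_modify_append]
  simp

-- pvInnerA never removes from downstream
lemma pvInnerA_down_mono (current : String) (level : Int) (maxl : Option Int)
    (visited : List String) (es : List (String × String)) :
    ∀ (dn : List String) (q : List (String × Int)) (x : String), x ∈ dn →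
      x ∈ (pvInnerA current level maxl visited es dn q).1 := by
  induction es with
  | nil => intro dn q x hx; simpa [pvInnerA] using hx
  | cons e es ih =>
    intro dn q x hx
    obtain ⟨p, c⟩ := e
    by_cases h : p = current ∧ c ∉ visited
    · by_cases hl : pvLevelOk maxl level
      · simp only [pvInnerA, if_pos h, if_pos hl]
        exact ih _ _ x (by simp [PySem.Set.mem_add, hx])
      · simp only [pvInnerA, if_pos h, if_neg hl]; exact ih _ _ x hx
    · simp only [pvInnerA, if_neg h]; exact ih _ _ x hx

-- when the level gate is closed pvInnerA does nothing
lemma pvInnerA_blocked (current : String) (level : Int) (maxl : Option Int)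
    (visited : List String) (es : List (String × String))
    (hl : pvLevelOk maxl level = false) :
    ∀ (dn : List String) (q : List (String × Int)),
      pvInnerA current level maxl visited es dn q = (dn, q) := by
  induction es with
  | nil => intro dn q; simp [pvInnerA]
  | cons e es ih =>
    intro dn q
    obtain ⟨p, c⟩ := e
    by_cases h : p = current ∧ c ∉ visited
    · simp only [pvInnerA, if_pos h, hl]
      simpa using ih dn q
    · simp only [pvInnerA, if_neg h]
      exact ih dn q

-- draining a queue whose nodes are all visited returns downstream unchanged
lemma pvDrainVisited (edges : List (String × String)) (maxl : Option Int) (d : Int)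
    (P visited down : List String) (h : ∀ x ∈ P, x ∈ visited) :
    pvLoopA edges maxl (P.map (fun s => (s, d))) visited down = down := by
  induction P with
  | nil => simp [pvLoopA_nil]
  | cons c P ih =>
    simp only [List.map_cons]
    rw [pvLoopA_cons, if_pos (h c (by simp))]
    exact ih (fun x hx => h x (by simp [hx]))

-- draining a level whose children additions are all blocked returns downstream unchanged
lemma pvDrainNoAdd (edges : List (String × String)) (maxl : Option Int) (d : Int)
    (hl : pvLevelOk maxl d = false) :
    ∀ (P visited down : List String),
      pvLoopA edges maxl (P.map (fun s => (s, d))) visited down = down := by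
  intro P
  induction P with
  | nil => intro visited down; simp [pvLoopA_nil]
  | cons c P ih =>
    intro visited down
    simp only [List.map_cons]
    rw [pvLoopA_cons]
    by_cases hc : c ∈ visited
    · rw [if_pos hc]; exact ih visited down
    · rw [if_neg hc, pvInnerA_blocked _ _ _ _ _ hl]
      exact ih _ down

-- pairs whose second components are all v are determined by their first components
lemma pvPairs_const_snd {l : List (String × Int)} {v : Int} (h : ∀ x ∈ l, x.2 = v) :
    l = (l.map Prod.fst).map (fun s => (s, v)) := by
  induction l with
  | nil => rfl
  | cons x l ih =>
    obtain ⟨a, b⟩ := x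
    have hb : b = v := h (a, b) (by simp)
    simp only [List.map_cons]
    rw [← ih (fun y hy => h y (by simp [hy])), hb]

-- THE KEY STEP LEMMA: scanning all edges from one unvisited node (A) corresponds to scanning
-- that node's adjacency list (B); the queue entries A appends reduce to the nodes B appends.
lemma pvSub (cur : String) (lvl : Int) (maxl : Option Int) (node_id : String)
    (V U : List String) (hok : pvLevelOk maxl lvl = true) (hnid : node_id ∈ V) :
    ∀ (es : List (String × String)) (down nxt : List String),
      (∀ x ∈ V, x = node_id ∨ x ∈ down) →
      (∀ x, x ∉ V → ((x ∈ U ∨ x ∈ nxt) ↔ (x = node_id ∨ x ∈ down))) →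
      (pvProcChildren ((es.filter (fun p => p.1 == cur)).map Prod.snd) (node_id :: down) down nxt).1
          = node_id :: (pvProcChildren ((es.filter (fun p => p.1 == cur)).map Prod.snd) (node_id :: down) down nxt).2.1 ∧
      (pvProcChildren ((es.filter (fun p => p.1 == cur)).map Prod.snd) (node_id :: down) down nxt).2.1
          = (pvInnerA cur lvl maxl V es down []).1 ∧
      (pvProcChildren ((es.filter (fun p => p.1 == cur)).map Prod.snd) (node_id :: down) down nxt).2.2
          = nxt ++ pvReduceQ (U ++ nxt) ((pvInnerA cur lvl maxl V es down []).2.map Prod.fst) ∧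
      (∀ x ∈ (pvInnerA cur lvl maxl V es down []).1,
          x ∈ down ∨ x ∈ (pvInnerA cur lvl maxl V es down []).2.map Prod.fst) ∧
      (∀ x ∈ (pvInnerA cur lvl maxl V es down []).2.map Prod.fst,
          x ∈ (pvInnerA cur lvl maxl V es down []).1) := by
  intro es
  induction es with
  | nil =>
    intro down nxt _ _
    simp [pvInnerA, pvProcChildren, pvReduceQ]
  | cons e es ih =>
    intro down nxt hV hmem
    obtain ⟨p, c⟩ := e
    by_cases hp : p = cur
    · by_cases hcV : c ∈ V
      · -- A skips (c visited); B skips (c ∈ seen, since V ⊆ node_id :: down)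
        have hA : ¬(p = cur ∧ c ∉ V) := by simp [hcV]
        have hcseen : c ∈ node_id :: down := by
          rcases hV c hcV with h | h
          · simp [h]
          · simp [h]
        simp only [pvInnerA, if_neg hA, List.filter_cons, List.map_cons]
        rw [if_pos (by simp [hp])]
        simp only [List.map_cons, pvProcChildren, if_pos hcseen]
        exact ih down nxt hV hmem
      · have hA : p = cur ∧ c ∉ V := ⟨hp, hcV⟩
        have hcne : c ≠ node_id := fun h => hcV (h ▸ hnid)
        by_cases hcdown : c ∈ down
        · -- c already discovered but not visited: A re-appends to the queue, B skips;
          -- the re-appended entry is dropped by pvReduceQ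
          have hcU : c ∈ U ++ nxt := by
            rcases (hmem c hcV).2 (Or.inr hcdown) with h | h <;> simp [h]
          simp only [pvInnerA, if_pos hA, hok, if_pos, List.filter_cons, List.nil_append]
          rw [if_pos (by simp [hp])]
          simp only [List.map_cons, pvProcChildren,
            if_pos (show c ∈ node_id :: down by simp [hcdown])]
          rw [PySem.Set.add_of_mem hcdown]
          have hsplit : pvInnerA cur lvl maxl V es down [(c, lvl + 1)]
              = ((pvInnerA cur lvl maxl V es down []).1,
                 (c, lvl + 1) :: (pvInnerA cur lvl maxl V es down []).2) := by
            rw [pvInnerA_q cur lvl maxl V es down [(c, lvl + 1)]]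
            rfl
          rw [hsplit]
          obtain ⟨g1, g2, g3, g4, g5⟩ := ih down nxt hV hmem
          refine ⟨g1, g2, ?_, ?_, ?_⟩
          · rw [g3]
            simp only [List.map_cons, pvReduceQ, if_pos hcU]
          · intro x hx
            rcases g4 x hx with h | h
            · exact Or.inl h
            · exact Or.inr (by simp only [List.map_cons, List.mem_cons]; exact Or.inr h)
          · intro x hx
            simp only [List.map_cons, List.mem_cons] at hx
            rcases hx with hxc | hx
            · rw [hxc]
              exact pvInnerA_down_mono cur lvl maxl V es down [] c hcdown
            · exact g5 x hx
        · -- genuinely new child: both sides append c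
          have hcnew : c ∉ node_id :: down := by simp [hcne, hcdown]
          have hcUn : c ∉ U ++ nxt := by
            intro h
            have : c = node_id ∨ c ∈ down := (hmem c hcV).1 (by
              rcases List.mem_append.mp h with h' | h' <;> [exact Or.inl h'; exact Or.inr h'])
            tauto
          simp only [pvInnerA, if_pos hA, hok, if_pos, List.filter_cons, List.nil_append]
          rw [if_pos (by simp [hp])]
          simp only [List.map_cons, pvProcChildren, if_neg hcnew]
          rw [PySem.Set.add_of_not_mem hcnew, PySem.Set.add_of_not_mem hcdown]
          have hsplit : pvInnerA cur lvl maxl V es (down ++ [c]) [(c, lvl + 1)]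
              = ((pvInnerA cur lvl maxl V es (down ++ [c]) []).1,
                 (c, lvl + 1) :: (pvInnerA cur lvl maxl V es (down ++ [c]) []).2) := by
            rw [pvInnerA_q cur lvl maxl V es (down ++ [c]) [(c, lvl + 1)]]
            rfl
          rw [hsplit]
          have hV' : ∀ x ∈ V, x = node_id ∨ x ∈ down ++ [c] := fun x hx =>
            (hV x hx).imp id (fun h => by simp [h])
          have hmem' : ∀ x, x ∉ V → ((x ∈ U ∨ x ∈ nxt ++ [c]) ↔ (x = node_id ∨ x ∈ down ++ [c])) := by
            intro x hx
            by_cases hxc : x = c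
            · subst hxc; simp
            · have H := hmem x hx
              simp only [List.mem_append, List.mem_singleton, hxc, or_false]
              exact H
          obtain ⟨g1, g2, g3, g4, g5⟩ := ih (down ++ [c]) (nxt ++ [c]) hV' hmem'
          have hseen : (node_id :: down) ++ [c] = node_id :: (down ++ [c]) := by simp
          rw [hseen]
          refine ⟨g1, g2, ?_, ?_, ?_⟩
          · rw [g3, List.map_cons]
            simp only [pvReduceQ, if_neg hcUn]
            have hcg : pvReduceQ (U ++ (nxt ++ [c]))
                  ((pvInnerA cur lvl maxl V es (down ++ [c]) []).2.map Prod.fst)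
                = pvReduceQ (c :: (U ++ nxt))
                  ((pvInnerA cur lvl maxl V es (down ++ [c]) []).2.map Prod.fst) :=
              pvReduceQ_congr _ (by
                intro x
                simp only [List.mem_append, List.mem_cons, List.mem_singleton]
                tauto)
            rw [hcg, List.append_assoc]
            rfl
          · intro x hx
            rcases g4 x hx with h | h
            · rcases List.mem_append.mp h with h' | h'
              · exact Or.inl h'
              · exact Or.inr (by
                  simp only [List.map_cons, List.mem_cons]
                  exact Or.inl (by simpa using h'))
            · exact Or.inr (by simp only [List.map_cons, List.mem_cons]; exact Or.inr h)
          · intro x hx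
            simp only [List.map_cons, List.mem_cons] at hx
            rcases hx with hxc | hx
            · rw [hxc]
              exact pvInnerA_down_mono cur lvl maxl V es (down ++ [c]) [] c (by simp)
            · exact g5 x hx
    · -- edge with a different parent: both sides skip it
      have hA : ¬(p = cur ∧ c ∉ V) := by simp [hp]
      simp only [pvInnerA, if_neg hA, List.filter_cons]
      rw [if_neg (by simp [hp])]
      exact ih down nxt hV hmem

-- processing one unvisited node, with the resulting queue written as an append
lemma pvLoopA_cons_new (edges : List (String × String)) (maxl : Option Int) (c : String) (l : Int)
    (q : List (String × Int)) (visited down : List String) (hc : c ∉ visited) :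
    pvLoopA edges maxl ((c, l) :: q) visited down =
      pvLoopA edges maxl (q ++ (pvInnerA c l maxl (PySem.Set.add visited c) edges down []).2)
        (PySem.Set.add visited c) (pvInnerA c l maxl (PySem.Set.add visited c) edges down []).1 := by
  rw [pvLoopA_cons, if_neg hc, pvInnerA_q]

-- the measure for the main simulation induction
def pvM (edges : List (String × String)) (P N visited : List String) : Nat :=
  2 * (((edges.map Prod.snd ++ (P ++ N)).toFinset \ visited.toFinset).card * (edges.length + 1)
        + P.length + N.length)
    + (if P = [] then 1 else 0)

-- MAIN SIMULATION: A's loop, mid-level d with pending entries P at level d and N at level d+1,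
-- equals B's loop with the corresponding frontier remainder and next-frontier accumulator.
lemma pvMain (node_id : String) (edges : List (String × String)) (maxl : Option Int) :
    ∀ (n : Nat) (d : Int) (P N visited down : List String),
      pvM edges P N visited ≤ n →
      pvLevelOk maxl d = true →
      (∀ x ∈ visited, x = node_id ∨ x ∈ down) →
      (node_id ∈ visited ∨ (visited = [] ∧ down = [] ∧ P = [node_id] ∧ N = [])) →
      (∀ x, x ∈ P ∨ x ∈ N → x = node_id ∨ x ∈ down) →
      (∀ x ∈ down, x ∈ visited ∨ x ∈ P ∨ x ∈ N) →
      pvLoopA edges maxl (P.map (fun s => (s, d)) ++ N.map (fun s => (s, d + 1))) visited down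
        = pvLoopBMid (pvBuildChildren edges) maxl (pvReduceQ visited P) (node_id :: down) down
            (pvReduceQ (visited ++ P) N) d := by
  intro n
  induction n with
  | zero =>
    intro d P N visited down hM
    exfalso
    unfold pvM at hM
    split_ifs at hM with hP
    · omega
    · have : 0 < P.length := List.length_pos_iff.mpr hP
      omega
  | succ n ih =>
    intro d P N visited down hM hok hI1 hI2 hJ hK
    cases P with
    | nil =>
      simp only [List.map_nil, List.nil_append, List.append_nil]
      have hmid : pvLoopBMid (pvBuildChildren edges) maxl (pvReduceQ visited [])
          (node_id :: down) down (pvReduceQ visited N) d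
          = pvLoopB (pvBuildChildren edges) maxl (pvReduceQ visited N) (node_id :: down) down (d + 1) := by
        simp [pvLoopBMid, pvProcFrontier, pvReduceQ]
      rw [hmid, pvLoopB_eq]
      by_cases hnil : pvReduceQ visited N = []
      · rw [if_pos (by simp [hnil])]
        exact pvDrainVisited edges maxl (d + 1) N visited down (pvReduceQ_nil_forall hnil)
      · by_cases hstop : pvStopB maxl (d + 1) = true
        · rw [if_pos (by simp [hstop])]
          apply pvDrainNoAdd
          cases maxl with
          | none => simp [pvStopB] at hstop
          | some m =>
            simp only [pvStopB, decide_eq_true_eq] at hstop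
            simp only [pvLevelOk, decide_eq_false_iff_not]
            omega
        · rw [if_neg (by simp [hnil, hstop])]
          have hNne : N ≠ [] := by
            intro h; subst h; simp [pvReduceQ] at hnil
          have hok' : pvLevelOk maxl (d + 1) = true := by
            cases maxl with
            | none => simp [pvLevelOk]
            | some m =>
              simp only [pvStopB, decide_eq_true_eq] at hstop
              simp only [pvLevelOk, decide_eq_true_eq]
              omega
          have hI2' : node_id ∈ visited ∨ (visited = [] ∧ down = [] ∧ N = [node_id] ∧ ([] : List String) = []) := by
            rcases hI2 with h | ⟨_, _, h3, _⟩
            · exact Or.inl h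
            · exact absurd h3.symm (by simp)
          have hM' : pvM edges N [] visited ≤ n := by
            unfold pvM at hM ⊢
            simp [hNne] at hM ⊢
            omega
          have := ih (d + 1) N [] visited down hM' hok' hI1 hI2'
            (fun x hx => hJ x (by tauto))
            (fun x hx => by rcases hK x hx with h | h | h <;> tauto)
          simpa [pvReduceQ] using this
    | cons c P' =>
      by_cases hc : c ∈ visited
      · -- pop a visited head: A skips it, B's frontier remainder is unchanged
        simp only [List.map_cons, List.cons_append]
        rw [pvLoopA_cons, if_pos hc]
        have h1 : pvReduceQ visited (c :: P') = pvReduceQ visited P' := by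
          simp [pvReduceQ, if_pos hc]
        have h2 : pvReduceQ (visited ++ c :: P') N = pvReduceQ (visited ++ P') N :=
          pvReduceQ_congr N (by
            intro x
            simp only [List.mem_append, List.mem_cons]
            constructor
            · rintro (h | rfl | h)
              · exact Or.inl h
              · exact Or.inl hc
              · exact Or.inr h
            · rintro (h | h)
              · exact Or.inl h
              · exact Or.inr (Or.inr h))
        rw [h1, h2]
        have hM' : pvM edges P' N visited ≤ n := by
          unfold pvM at hM ⊢
          have hsub : ((edges.map Prod.snd ++ (P' ++ N)).toFinset \ visited.toFinset) ⊆
              ((edges.map Prod.snd ++ (c :: (P' ++ N))).toFinset \ visited.toFinset) := by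
            intro x hx
            simp only [Finset.mem_sdiff, List.mem_toFinset, List.mem_append, List.mem_cons] at hx ⊢
            tauto
          have := Nat.mul_le_mul_right (edges.length + 1) (Finset.card_le_card hsub)
          simp only [List.cons_append, List.length_cons, if_neg (by simp : (c :: P') ≠ [])] at hM
          split_ifs <;> omega
        exact ih d P' N visited down hM' hok hI1
          (by
            rcases hI2 with h | ⟨h1', _, _, _⟩
            · exact Or.inl h
            · exact absurd hc (by simp [h1']))
          (fun x hx => hJ x (by tauto))
          (fun x hx => by
            rcases hK x hx with h | h | h
            · exact Or.inl h
            · rcases List.mem_cons.mp h with rfl | h'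
              · exact Or.inl hc
              · exact Or.inr (Or.inl h')
            · exact Or.inr (Or.inr h))
      · -- pop an unvisited head: one pvSub step, then the induction hypothesis
        simp only [List.map_cons, List.cons_append]
        rw [pvLoopA_cons_new edges maxl c d _ visited down hc]
        have hvadd : PySem.Set.add visited c = visited ++ [c] := PySem.Set.add_of_not_mem hc
        have hprops := pvInnerA_props c d maxl (PySem.Set.add visited c) edges down
        have hWpairs : (pvInnerA c d maxl (PySem.Set.add visited c) edges down []).2
            = ((pvInnerA c d maxl (PySem.Set.add visited c) edges down []).2.map Prod.fst).map
                (fun s => (s, d + 1)) :=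
          pvPairs_const_snd (fun x hx => (hprops.1 x hx).1)
        have hnid' : node_id ∈ PySem.Set.add visited c := by
          rcases hI2 with h | ⟨_, _, h3, _⟩
          · simp [PySem.Set.mem_add, h]
          · obtain ⟨rfl, _⟩ := List.cons_eq_cons.mp h3
            simp [PySem.Set.mem_add]
        have hVsub : ∀ x ∈ PySem.Set.add visited c, x = node_id ∨ x ∈ down := by
          intro x hx
          rw [hvadd] at hx
          rcases List.mem_append.mp hx with h | h
          · exact hI1 x h
          · simp only [List.mem_singleton] at h
            exact hJ x (Or.inl (by simp [h]))
        have hmem : ∀ x, x ∉ PySem.Set.add visited c →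
            ((x ∈ (PySem.Set.add visited c ++ P' ++ N) ∨ x ∈ pvReduceQ (visited ++ c :: P') N)
              ↔ (x = node_id ∨ x ∈ down)) := by
          intro x hx
          constructor
          · rintro (h | h)
            · rcases List.mem_append.mp h with h' | h'
              · rcases List.mem_append.mp h' with h'' | h''
                · exact absurd h'' hx
                · exact hJ x (Or.inl (List.mem_cons_of_mem _ h''))
              · exact hJ x (Or.inr h')
            · exact hJ x (Or.inr (pvReduceQ_subset h).1)
          · rintro (rfl | hdn)
            · exact absurd hnid' hx
            · rcases hK x hdn with h | h | h
              · exact absurd (by simp [PySem.Set.mem_add, h] : x ∈ PySem.Set.add visited c) hx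
              · rcases List.mem_cons.mp h with hxc | h'
                · exact absurd (by simp [PySem.Set.mem_add, hxc] : x ∈ PySem.Set.add visited c) hx
                · exact Or.inl (by simp [h'])
              · by_cases hxP : x ∈ P'
                · exact Or.inl (by simp [hxP])
                · refine Or.inr (pvMem_reduceQ h ?_)
                  intro hxm
                  rcases List.mem_append.mp hxm with h' | h'
                  · exact hx (by simp [PySem.Set.mem_add, h'])
                  · rcases List.mem_cons.mp h' with hxc | h''
                    · exact hx (by simp [PySem.Set.mem_add, hxc])
                    · exact hxP h''
        obtain ⟨g1, g2, g3, g4, g5⟩ := pvSub c d maxl node_id (PySem.Set.add visited c)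
          (PySem.Set.add visited c ++ P' ++ N) hok hnid' edges down
          (pvReduceQ (visited ++ c :: P') N) hVsub hmem
        have hred : pvReduceQ visited (c :: P') = c :: pvReduceQ (c :: visited) P' := by
          simp [pvReduceQ, if_neg hc]
        rw [hred, pvLoopBMid_cons, pvBuildChildren_getD, g2, g3]
        rw [g2] at g1
        rw [g1]
        -- align with the induction hypothesis at state (P', N ++ appended, visited + c, down')
        have e1 : pvReduceQ (c :: visited) P' = pvReduceQ (PySem.Set.add visited c) P' :=
          pvReduceQ_congr P' (by
            intro x
            rw [hvadd]
            simp only [List.mem_cons, List.mem_append, List.mem_singleton]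
            tauto)
        have eN : pvReduceQ (PySem.Set.add visited c ++ P') N = pvReduceQ (visited ++ c :: P') N :=
          pvReduceQ_congr N (by
            intro x
            rw [hvadd]
            simp only [List.mem_cons, List.mem_append, List.mem_singleton]
            tauto)
        have eU : pvReduceQ ((PySem.Set.add visited c ++ P') ++ pvReduceQ (visited ++ c :: P') N)
              ((pvInnerA c d maxl (PySem.Set.add visited c) edges down []).2.map Prod.fst)
            = pvReduceQ ((PySem.Set.add visited c ++ P' ++ N) ++ pvReduceQ (visited ++ c :: P') N)
              ((pvInnerA c d maxl (PySem.Set.add visited c) edges down []).2.map Prod.fst) := by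
          refine pvReduceQ_congr _ (fun x => ?_)
          simp only [List.mem_append]
          constructor
          · rintro ((h | h) | h)
            · exact Or.inl (Or.inl (Or.inl h))
            · exact Or.inl (Or.inl (Or.inr h))
            · exact Or.inr h
          · rintro ((h | h) | h)
            · rcases h with h' | h'
              · exact Or.inl (Or.inl h')
              · exact Or.inl (Or.inr h')
            · -- x ∈ N: either already in visited/c/P', or pvReduceQ keeps it
              by_cases hxm : x ∈ visited ++ c :: P'
              · rcases List.mem_append.mp hxm with h' | h'
                · exact Or.inl (Or.inl (by rw [hvadd]; simp [h']))
                · rcases List.mem_cons.mp h' with rfl | h''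
                  · exact Or.inl (Or.inl (by rw [hvadd]; simp))
                  · exact Or.inl (Or.inr h'')
              · exact Or.inr (pvMem_reduceQ h hxm)
            · exact Or.inr h
        have hNfEq : pvReduceQ (PySem.Set.add visited c ++ P') (N ++
              (pvInnerA c d maxl (PySem.Set.add visited c) edges down []).2.map Prod.fst)
            = pvReduceQ (visited ++ c :: P') N ++
              pvReduceQ ((PySem.Set.add visited c ++ P' ++ N) ++ pvReduceQ (visited ++ c :: P') N)
                ((pvInnerA c d maxl (PySem.Set.add visited c) edges down []).2.map Prod.fst) := by
          rw [pvReduceQ_append, eN, ← eU]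
        -- the queue after the step is P' at level d plus (N ++ appended) at level d+1
        have hq : (P'.map (fun s => (s, d)) ++ N.map (fun s => (s, d + 1))) ++
              (pvInnerA c d maxl (PySem.Set.add visited c) edges down []).2
            = P'.map (fun s => (s, d)) ++
              (N ++ (pvInnerA c d maxl (PySem.Set.add visited c) edges down []).2.map Prod.fst).map
                (fun s => (s, d + 1)) := by
          conv_lhs => rw [hWpairs]
          simp [List.map_append, List.append_assoc]
        rw [hq, e1, ← hNfEq]
        -- invariants for the new state
        have hdownW := pvInnerA_down_mono c d maxl (PySem.Set.add visited c) edges down []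
        have hI1' : ∀ x ∈ PySem.Set.add visited c,
            x = node_id ∨ x ∈ (pvInnerA c d maxl (PySem.Set.add visited c) edges down []).1 :=
          fun x hx => (hVsub x hx).imp id (fun h => hdownW x h)
        have hJ' : ∀ x, x ∈ P' ∨ x ∈ (N ++
              (pvInnerA c d maxl (PySem.Set.add visited c) edges down []).2.map Prod.fst) →
            x = node_id ∨ x ∈ (pvInnerA c d maxl (PySem.Set.add visited c) edges down []).1 := by
          rintro x (h | h)
          · exact (hJ x (Or.inl (List.mem_cons_of_mem _ h))).imp id (fun h' => hdownW x h')
          · rcases List.mem_append.mp h with h' | h'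
            · exact (hJ x (Or.inr h')).imp id (fun h'' => hdownW x h'')
            · exact Or.inr (g5 x h')
        have hK' : ∀ x ∈ (pvInnerA c d maxl (PySem.Set.add visited c) edges down []).1,
            x ∈ PySem.Set.add visited c ∨ x ∈ P' ∨ x ∈ (N ++
              (pvInnerA c d maxl (PySem.Set.add visited c) edges down []).2.map Prod.fst) := by
          intro x hx
          rcases g4 x hx with h | h
          · rcases hK x h with h' | h' | h'
            · exact Or.inl (by rw [hvadd]; simp [h'])
            · rcases List.mem_cons.mp h' with rfl | h''
              · exact Or.inl (by rw [hvadd]; simp)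
              · exact Or.inr (Or.inl h'')
            · exact Or.inr (Or.inr (by simp [h']))
          · exact Or.inr (Or.inr (by simp [h]))
        have hNfsub : ∀ z ∈ (pvInnerA c d maxl (PySem.Set.add visited c) edges down []).2.map Prod.fst,
            z ∈ edges.map Prod.snd := by
          intro z hz
          obtain ⟨y, hy, hyz⟩ := List.mem_map.mp hz
          exact hyz ▸ (hprops.1 y hy).2.1
        have hM' : pvM edges P' (N ++
              (pvInnerA c d maxl (PySem.Set.add visited c) edges down []).2.map Prod.fst)
              (PySem.Set.add visited c) ≤ n := by
          have hlen : ((pvInnerA c d maxl (PySem.Set.add visited c) edges down []).2.map Prod.fst).length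
              ≤ edges.length := by
            rw [List.length_map]; exact hprops.2
          have hcard : (((edges.map Prod.snd ++ (P' ++ (N ++
                  (pvInnerA c d maxl (PySem.Set.add visited c) edges down []).2.map Prod.fst))).toFinset
                \ (PySem.Set.add visited c).toFinset).card) + 1 ≤
              ((edges.map Prod.snd ++ (c :: (P' ++ N))).toFinset \ visited.toFinset).card := by
            refine Finset.card_lt_card ?_
            constructor
            · intro x hx
              simp only [Finset.mem_sdiff, List.mem_toFinset, List.mem_append, List.mem_cons] at hx ⊢
              obtain ⟨hx1, hx2⟩ := hx
              refine ⟨?_, fun hv => hx2 (by rw [hvadd]; simp [hv])⟩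
              rcases hx1 with h | h | h | h
              · exact Or.inl h
              · tauto
              · tauto
              · exact Or.inl (hNfsub x h)
            · intro hsubs
              have hcmem : c ∈ ((edges.map Prod.snd ++ (c :: (P' ++ N))).toFinset \ visited.toFinset) := by
                simp [List.mem_toFinset, hc]
              have := hsubs hcmem
              rw [hvadd] at this
              simp at this
          have hmul := Nat.mul_le_mul_right (edges.length + 1) hcard
          rw [Nat.succ_mul] at hmul
          unfold pvM at hM ⊢
          simp only [List.cons_append, List.length_append, List.length_map, List.length_cons,
            if_neg (by simp : (c :: P') ≠ [])] at hM ⊢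
          split_ifs <;> omega
        exact ih d P' (N ++ (pvInnerA c d maxl (PySem.Set.add visited c) edges down []).2.map Prod.fst)
          (PySem.Set.add visited c)
          (pvInnerA c d maxl (PySem.Set.add visited c) edges down []).1
          hM' hok hI1' (Or.inl hnid') hJ' hK'

-- ===== VERDICT (by name: the statement is the Claim_ definition above) =====
theorem collect_downstream_deps_spec : Claim_equal_collect_downstream_deps := by
  unfold Claim_equal_collect_downstream_deps
  intro node_id edges nodes maxl _
  unfold Spec_collect_downstream_deps collect_downstream_deps collect_downstream_deps_alt
  show pvLoopA edges maxl [(node_id, 0)] [] []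
      = pvLoopB (pvBuildChildren edges) maxl [node_id] [node_id] [] 0
  by_cases hstop : pvStopB maxl 0 = true
  · -- max_level = some m with m ≤ 0: A visits node_id, adds nothing, B's loop exits at once
    rw [pvLoopB_eq, if_pos (by simp [hstop])]
    have hlv : pvLevelOk maxl 0 = false := by
      cases maxl with
      | none => simp [pvStopB] at hstop
      | some m =>
        simp only [pvStopB, decide_eq_true_eq] at hstop
        simp only [pvLevelOk, decide_eq_false_iff_not]
        omega
    rw [pvLoopA_cons, if_neg (by simp), pvInnerA_blocked _ _ _ _ _ hlv]
    exact pvLoopA_nil edges maxl _ _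
  · have hok : pvLevelOk maxl 0 = true := by
      cases maxl with
      | none => simp [pvLevelOk]
      | some m =>
        simp only [pvStopB, decide_eq_true_eq, Bool.not_eq_true] at hstop
        simp only [pvLevelOk, decide_eq_true_eq]
        omega
    rw [pvLoopB_eq, if_neg (by simp [hstop])]
    have := pvMain node_id edges maxl (pvM edges [node_id] [] []) 0 [node_id] [] [] []
      le_rfl hok (by simp) (Or.inr (by simp))
      (by intro x hx; simp at hx; exact Or.inl hx)
      (by simp)
    simpa [pvReduceQ] using this
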